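-- pv_equiv track=rewrite | github.com/MisfiT2020/StreamXBot | stream/plugins/Analyzer/mediaHelper.py | _parse_mediainfo
-- ===== SOURCE A (Python) =====
-- def _parse_mediainfo(output: str) -> dict[str, dict[str, str]]:
--     sections: dict[str, dict[str, str]] = {}
--     current = ""
--     for raw in (output or "").splitlines():
--         line = raw.rstrip("\n")
--         header = line.strip()
--         if header and header.lower() in {"general", "audio", "video", "text", "image", "menu"}:
--             current = header.lower()
--             sections.setdefault(current, {})
--             continue
--         if not current:
--             continue
--         if " : " not in line:
--             continue
--         key, value = line.split(" : ", 1)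
--         k = key.strip().lower()
--         v = value.strip()
--         if not k or not v:
--             continue
--         sections.setdefault(current, {})
--         if k not in sections[current]:
--             sections[current][k] = v
--     return sections
-- ===== SOURCE B (Python) =====
-- _HEADERS = {"general", "audio", "video", "text", "image", "menu"}
--
--
-- def _parse_mediainfo(output: str) -> dict[str, dict[str, str]]:
--     # Pass 1: segment the lines into (section name, body lines) runs.
--     segments: list[tuple[str, list[str]]] = []
--     for line in (output or "").splitlines():
--         h = line.strip().lower()
--         if h in _HEADERS:
--             segments.append((h, []))
--         elif segments:
--             segments[-1][1].append(line)
--     # Pass 2: fill one shared dict so duplicate headers merge, first key wins.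
--     sections: dict[str, dict[str, str]] = {}
--     for name, body in segments:
--         sec = sections.setdefault(name, {})
--         for line in body:
--             if " : " in line:
--                 key, value = line.split(" : ", 1)
--                 k, v = key.strip().lower(), value.strip()
--                 if k and v and k not in sec:
--                     sec[k] = v
--     return sections
-- ===== Notes on version B (the rewrite author's own statement) =====
-- stated objective: alternative
-- what changed: B replaces A's single stateful line loop (current-section string threaded through every line) by two passes: first segment the lines into (header, body-lines) runs, then fill one shared sections dict segment by segment.
import Mathlib
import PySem

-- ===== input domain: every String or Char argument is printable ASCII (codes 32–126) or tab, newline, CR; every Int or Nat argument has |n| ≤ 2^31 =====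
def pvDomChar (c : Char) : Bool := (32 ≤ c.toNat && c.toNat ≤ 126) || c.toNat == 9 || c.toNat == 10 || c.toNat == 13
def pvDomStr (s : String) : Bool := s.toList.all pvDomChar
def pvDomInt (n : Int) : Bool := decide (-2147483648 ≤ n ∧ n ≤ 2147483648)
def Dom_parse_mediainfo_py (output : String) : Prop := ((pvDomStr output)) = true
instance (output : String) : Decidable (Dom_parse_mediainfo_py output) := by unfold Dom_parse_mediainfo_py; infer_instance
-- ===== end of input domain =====

-- B replaces A's single stateful line loop by two passes (segment the lines into
-- (header, body) runs, then fill one shared sections dict); same result, proved equal.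

-- ===== PORT A =====

def pvHeadersA : List String := ["general", "audio", "video", "text", "image", "menu"]

-- exact port of raw.rstrip("\n") (drop only '\n' characters from the right end)
def pvRstripNl (raw : String) : String :=
  String.ofList ((raw.toList.reverse.dropWhile (fun c => c == '\n')).reverse)

-- one iteration of A's loop over (output or "").splitlines(); state = (sections, current)
def pvAStep (st : PySem.Dict String (PySem.Dict String String) × String) (raw : String) :
    PySem.Dict String (PySem.Dict String String) × String :=
  let line := pvRstripNl raw
  let header := PySem.Str.strip line
  if header ≠ "" ∧ pvHeadersA.contains (PySem.Str.lower header) then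
    let current := PySem.Str.lower header
    (st.1.setdefault current PySem.Dict.empty, current)
  else if st.2 = "" then st
  else if PySem.Str.isIn " : " line = false then st
  else
    match PySem.Str.splitMax? line " : " 1 with
    | some (key :: value :: _) =>  -- " : " ∈ line, so split(" : ", 1) yields exactly two parts
      let k := PySem.Str.lower (PySem.Str.strip key)
      let v := PySem.Str.strip value
      if k = "" ∨ v = "" then st
      else
        let d := st.1.setdefault st.2 PySem.Dict.empty
        let sec := d.getD st.2 PySem.Dict.empty
        if sec.contains k then (d, st.2) else (d.insert st.2 (sec.insert k v), st.2)
    | _ => st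

def parse_mediainfo_py (output : String) : List (String × List (String × String)) :=
  let src := if output == "" then "" else output  -- (output or "")
  (((PySem.Str.splitlines src).foldl pvAStep (PySem.Dict.empty, "")).1).items.map
    (fun kv => (kv.1, kv.2.items))

-- ===== PORT B =====

def pvHeadersB : List String := ["general", "audio", "video", "text", "image", "menu"]

-- segments[-1][1].append(line)
def pvAppendLast (segs : List (String × List String)) (line : String) :
    List (String × List String) :=
  match segs with
  | [] => []
  | s :: rest =>
    match rest with
    | [] => [(s.1, s.2 ++ [line])]
    | _ :: _ => s :: pvAppendLast rest line

-- pass 1 step: start a new segment on a header line, else append to the last segment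
def pvCollectStep (segs : List (String × List String)) (line : String) :
    List (String × List String) :=
  let h := PySem.Str.lower (PySem.Str.strip line)
  if pvHeadersB.contains h then segs ++ [(h, [])]
  else
    match segs with
    | [] => segs
    | _ => pvAppendLast segs line

-- one body line of pass 2; every insert into sec updates sections[name] (sec aliases it)
def pvBodyStep (name : String) (d : PySem.Dict String (PySem.Dict String String))
    (line : String) : PySem.Dict String (PySem.Dict String String) :=
  if PySem.Str.isIn " : " line then
    match PySem.Str.splitMax? line " : " 1 with
    | some (key :: value :: _) =>
      let k := PySem.Str.lower (PySem.Str.strip key)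
      let v := PySem.Str.strip value
      let sec := d.getD name PySem.Dict.empty
      if k ≠ "" ∧ v ≠ "" ∧ sec.contains k = false then d.insert name (sec.insert k v)
      else d
    | _ => d
  else d

-- pass 2, one segment: sec = sections.setdefault(name, {}); then its body lines
def pvApplySeg (d : PySem.Dict String (PySem.Dict String String))
    (seg : String × List String) : PySem.Dict String (PySem.Dict String String) :=
  seg.2.foldl (pvBodyStep seg.1) (d.setdefault seg.1 PySem.Dict.empty)

def parse_mediainfo_py_alt (output : String) : List (String × List (String × String)) :=
  let src := if output == "" then "" else output  -- (output or "")
  let segments := (PySem.Str.splitlines src).foldl pvCollectStep []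
  (segments.foldl pvApplySeg PySem.Dict.empty).items.map (fun kv => (kv.1, kv.2.items))

-- ===== PRECONDITION & SPEC =====
def Spec_parse_mediainfo_py (output : String) (out : List (String × List (String × String))) : Prop := out = parse_mediainfo_py_alt output
instance (output : String) (out : List (String × List (String × String))) : Decidable (Spec_parse_mediainfo_py output out) := by unfold Spec_parse_mediainfo_py; infer_instance

-- ===== CLAIM (what is proved, stated in full; the proofs are below) =====
def Claim_equal_parse_mediainfo_py : Prop := ∀ (output : String), Dom_parse_mediainfo_py output → Spec_parse_mediainfo_py output (parse_mediainfo_py output)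

-- ===== LEMMAS AND PROOFS =====

-- A's step with the (always-identity) rstrip("\n") removed; bridged by pvAStep_eq_noNl
def pvAStep' (st : PySem.Dict String (PySem.Dict String String) × String) (line : String) :
    PySem.Dict String (PySem.Dict String String) × String :=
  let header := PySem.Str.strip line
  if header ≠ "" ∧ pvHeadersA.contains (PySem.Str.lower header) then
    let current := PySem.Str.lower header
    (st.1.setdefault current PySem.Dict.empty, current)
  else if st.2 = "" then st
  else if PySem.Str.isIn " : " line = false then st
  else
    match PySem.Str.splitMax? line " : " 1 with
    | some (key :: value :: _) =>
      let k := PySem.Str.lower (PySem.Str.strip key)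
      let v := PySem.Str.strip value
      if k = "" ∨ v = "" then st
      else
        let d := st.1.setdefault st.2 PySem.Dict.empty
        let sec := d.getD st.2 PySem.Dict.empty
        if sec.contains k then (d, st.2) else (d.insert st.2 (sec.insert k v), st.2)
    | _ => st

lemma splitlines_go_no_break (isB : Char → Bool) (c : Char) (hc : isB c = true) :
    ∀ s cur acc, c ∉ cur → (∀ l ∈ acc, c ∉ l) →
      ∀ l ∈ PySem.Chars.splitlines.go isB s cur acc, c ∉ l := by
  intro s cur acc
  induction s, cur, acc using PySem.Chars.splitlines.go.induct (isB := isB) with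
  | case1 cur acc hemp =>
    intro hcur hacc l hl
    rw [PySem.Chars.splitlines.go] at hl
    rw [if_pos hemp] at hl
    exact hacc l (List.mem_reverse.mp hl)
  | case2 cur acc hemp =>
    intro hcur hacc l hl
    rw [PySem.Chars.splitlines.go] at hl
    rw [if_neg hemp] at hl
    rcases List.mem_cons.mp (List.mem_reverse.mp hl) with h | h
    · subst h; simpa using hcur
    · exact hacc l h
  | case3 rest cur acc ih =>
    intro hcur hacc l hl
    rw [PySem.Chars.splitlines.go] at hl
    refine ih (by simp) ?_ l hl
    intro l' hl'
    rcases List.mem_cons.mp hl' with h | h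
    · subst h; simpa using hcur
    · exact hacc l' h
  | case4 ch rest cur acc hne hb ih =>
    intro hcur hacc l hl
    rw [PySem.Chars.splitlines.go] at hl
    · rw [if_pos hb] at hl
      refine ih (by simp) ?_ l hl
      intro l' hl'
      rcases List.mem_cons.mp hl' with h | h
      · subst h; simpa using hcur
      · exact hacc l' h
    · exact hne
  | case5 ch rest cur acc hne hb ih =>
    intro hcur hacc l hl
    rw [PySem.Chars.splitlines.go] at hl
    · rw [if_neg hb] at hl
      refine ih ?_ hacc l hl
      intro hmem
      rcases List.mem_cons.mp hmem with h | h
      · subst h; exact absurd hc (by simpa using hb)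
      · exact hcur h
    · exact hne
lemma mem_splitlines_no_nl (s : String) :
    ∀ raw ∈ PySem.Str.splitlines s, ('\n' : Char) ∉ raw.toList := by
  intro raw hraw
  have h1 : raw.toList ∈ PySem.Chars.splitlines s.toList := by
    rw [← PySem.Str.splitlines_map_toList]
    exact List.mem_map_of_mem hraw
  unfold PySem.Chars.splitlines at h1
  exact splitlines_go_no_break _ '\n' (by decide) s.toList [] [] (by simp) (by simp) _ h1
lemma pvRstripNl_of_no_nl (raw : String) (h : ('\n' : Char) ∉ raw.toList) :
    pvRstripNl raw = raw := by
  unfold pvRstripNl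
  have hd : raw.toList.reverse.dropWhile (fun c => c == '\n') = raw.toList.reverse := by
    cases h' : raw.toList.reverse with
    | nil => simp
    | cons a b =>
      rw [List.dropWhile_cons_of_neg]
      have ha : a ∈ raw.toList := by
        rw [← List.mem_reverse, h']; exact List.mem_cons_self
      simp only [beq_iff_eq]
      intro heq
      exact h (heq ▸ ha)
  rw [hd, List.reverse_reverse, String.ofList_toList]
lemma pvAStep_eq_noNl (st : PySem.Dict String (PySem.Dict String String) × String)
    (raw : String) (h : ('\n' : Char) ∉ raw.toList) : pvAStep st raw = pvAStep' st raw := by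
  unfold pvAStep pvAStep'
  rw [pvRstripNl_of_no_nl raw h]

-- a line whose stripped+lowered form is one of the headers has nonempty strip
lemma header_ne_empty {line : String}
    (h : pvHeadersA.contains (PySem.Str.lower (PySem.Str.strip line)) = true) :
    PySem.Str.strip line ≠ "" := by
  intro heq
  rw [heq] at h
  revert h; decide

lemma headerA_ne_empty' {n : String} (h : pvHeadersA.contains n = true) : n ≠ "" := by
  intro heq; subst heq; revert h; decide

lemma contains_pvBodyStep (n : String) (d : PySem.Dict String (PySem.Dict String String))
    (line : String) (h : d.contains n = true) : (pvBodyStep n d line).contains n = true := by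
  unfold pvBodyStep
  dsimp only
  split
  · split
    · split
      · simp
      · exact h
    · exact h
  · exact h

lemma contains_pvApplySeg (d : PySem.Dict String (PySem.Dict String String))
    (n : String) (b : List String) : (pvApplySeg d (n, b)).contains n = true := by
  unfold pvApplySeg
  have h0 : (d.setdefault n PySem.Dict.empty).contains n = true := by
    simp [PySem.Dict.contains_setdefault]
  generalize d.setdefault n PySem.Dict.empty = d0 at h0 ⊢
  induction b generalizing d0 with
  | nil => exact h0
  | cons x xs ih => exact ih _ (contains_pvBodyStep n d0 x h0)

-- A's body-line step equals B's (the redundant inner setdefault is the identity)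
lemma pvAStep'_body (n : String) (d : PySem.Dict String (PySem.Dict String String))
    (line : String)
    (hH : pvHeadersA.contains (PySem.Str.lower (PySem.Str.strip line)) = false)
    (hn : n ≠ "") (hc : d.contains n = true) :
    pvAStep' (d, n) line = (pvBodyStep n d line, n) := by
  unfold pvAStep' pvBodyStep
  dsimp only
  rw [if_neg (fun hcon => absurd (by simpa using hcon.2 :
        PySem.Str.lower (PySem.Str.strip line) ∈ pvHeadersA) (by simpa using hH)), if_neg hn]
  by_cases hin : PySem.Str.isIn " : " line = false
  · rw [if_pos hin, if_neg (by simpa using hin)]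
  · rw [if_neg hin, if_pos (by simpa using hin)]
    rw [PySem.Dict.setdefault_of_contains _ _ hc]
    cases hsp : PySem.Str.splitMax? line " : " 1 with
    | none => rfl
    | some parts =>
      match parts with
      | [] => rfl
      | [x] => rfl
      | key :: value :: rest =>
        dsimp only
        by_cases hkv : PySem.Str.lower (PySem.Str.strip key) = "" ∨ PySem.Str.strip value = ""
        · rw [if_pos hkv, if_neg (by rcases hkv with h | h <;> simp [h])]
        · rw [if_neg hkv]
          rcases not_or.mp hkv with ⟨hk, hv⟩
          by_cases hck : (d.getD n PySem.Dict.empty).contains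
              (PySem.Str.lower (PySem.Str.strip key)) = true
          · rw [if_pos hck, if_neg (by simp [hck])]
          · rw [if_neg hck, if_pos ⟨hk, hv, by simpa using hck⟩]

lemma pvAppendLast_append (s t : List (String × List String)) (line : String)
    (ht : t ≠ []) : pvAppendLast (s ++ t) line = s ++ pvAppendLast t line := by
  induction s with
  | nil => rfl
  | cons x xs ih =>
    obtain ⟨a, b, hab⟩ : ∃ a b, xs ++ t = a :: b := by
      cases h : xs ++ t with
      | nil => exact absurd (List.append_eq_nil_iff.mp h).2 ht
      | cons a b => exact ⟨a, b, rfl⟩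
    simp only [List.cons_append, hab]
    rw [show pvAppendLast (x :: a :: b) line = x :: pvAppendLast (a :: b) line from rfl]
    rw [← hab, ih]

lemma pvAppendLast_ne_nil (segs : List (String × List String)) (line : String)
    (h : segs ≠ []) : pvAppendLast segs line ≠ [] := by
  cases segs with
  | nil => exact absurd rfl h
  | cons x xs => cases xs <;> simp [pvAppendLast]

lemma pvCollectStep_header (segs : List (String × List String)) (line : String)
    (hH : pvHeadersB.contains (PySem.Str.lower (PySem.Str.strip line)) = true) :
    pvCollectStep segs line = segs ++ [(PySem.Str.lower (PySem.Str.strip line), [])] := by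
  unfold pvCollectStep; dsimp only; rw [if_pos hH]

lemma pvCollectStep_body (segs : List (String × List String)) (line : String)
    (h : segs ≠ [])
    (hH : pvHeadersB.contains (PySem.Str.lower (PySem.Str.strip line)) = false) :
    pvCollectStep segs line = pvAppendLast segs line := by
  cases segs with
  | nil => exact absurd rfl h
  | cons a b => unfold pvCollectStep; dsimp only; rw [if_neg (by simpa using hH)]

lemma pvCollect_append (lines : List String) :
    ∀ (s t : List (String × List String)), t ≠ [] →
      lines.foldl pvCollectStep (s ++ t) = s ++ lines.foldl pvCollectStep t := by
  induction lines with
  | nil => intro s t _; rfl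
  | cons line ls ih =>
    intro s t ht
    simp only [List.foldl_cons]
    by_cases hH : pvHeadersB.contains (PySem.Str.lower (PySem.Str.strip line)) = true
    · rw [pvCollectStep_header (s ++ t) line hH, pvCollectStep_header t line hH,
        List.append_assoc]
      exact ih s _ (by simp)
    · rw [pvCollectStep_body (s ++ t) line (by simp [ht]) (by simpa using hH),
        pvCollectStep_body t line ht (by simpa using hH),
        pvAppendLast_append s t line ht]
      exact ih s _ (pvAppendLast_ne_nil t line ht)

lemma pv_main (lines : List String) :
    ∀ (d : PySem.Dict String (PySem.Dict String String)) (n : String) (b : List String),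
      pvHeadersA.contains n = true →
      List.foldl pvApplySeg d (List.foldl pvCollectStep [(n, b)] lines)
        = (List.foldl pvAStep' (pvApplySeg d (n, b), n) lines).1 := by
  induction lines with
  | nil => intro d n b _; rfl
  | cons line ls ih =>
    intro d n b hn
    simp only [List.foldl_cons]
    by_cases hH : pvHeadersB.contains (PySem.Str.lower (PySem.Str.strip line)) = true
    · -- header line: close segment (n,b), open a new one
      have hstep : pvCollectStep [(n, b)] line
          = [(n, b)] ++ [(PySem.Str.lower (PySem.Str.strip line), [])] :=
        pvCollectStep_header [(n, b)] line hH
      rw [hstep, pvCollect_append ls [(n, b)] _ (by simp), List.foldl_append]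
      have hA : pvAStep' (pvApplySeg d (n, b), n) line
          = (pvApplySeg (pvApplySeg d (n, b)) (PySem.Str.lower (PySem.Str.strip line), []),
             PySem.Str.lower (PySem.Str.strip line)) := by
        unfold pvAStep'
        rw [if_pos ⟨header_ne_empty hH, hH⟩]
        rfl
      rw [hA]
      exact ih _ _ [] hH
    · -- body line
      have hstep : pvCollectStep [(n, b)] line = [(n, b ++ [line])] := by
        rw [pvCollectStep_body [(n, b)] line (by simp) (by simpa using hH)]
        rfl
      rw [hstep]
      have hApp : pvApplySeg d (n, b ++ [line])
          = pvBodyStep n (pvApplySeg d (n, b)) line := by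
        unfold pvApplySeg; simp [List.foldl_append]
      have hA : pvAStep' (pvApplySeg d (n, b), n) line
          = (pvBodyStep n (pvApplySeg d (n, b)) line, n) :=
        pvAStep'_body n _ line (by simpa using hH) (headerA_ne_empty' hn)
          (contains_pvApplySeg d n b)
      rw [hA]
      have := ih (d) n (b ++ [line]) hn
      rw [hApp] at this
      exact this

lemma pv_top (lines : List String) :
    ∀ (d : PySem.Dict String (PySem.Dict String String)),
      List.foldl pvApplySeg d (List.foldl pvCollectStep [] lines)
        = (List.foldl pvAStep' (d, "") lines).1 := by
  induction lines with
  | nil => intro d; rfl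
  | cons line ls ih =>
    intro d
    simp only [List.foldl_cons]
    by_cases hH : pvHeadersB.contains (PySem.Str.lower (PySem.Str.strip line)) = true
    · have hstep : pvCollectStep [] line
          = [(PySem.Str.lower (PySem.Str.strip line), [])] := by
        unfold pvCollectStep; rw [if_pos hH]; rfl
      have hA : pvAStep' (d, "") line
          = (pvApplySeg d (PySem.Str.lower (PySem.Str.strip line), []),
             PySem.Str.lower (PySem.Str.strip line)) := by
        unfold pvAStep'
        rw [if_pos ⟨header_ne_empty hH, hH⟩]
        rfl
      rw [hstep, hA]
      exact pv_main ls d _ [] hH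
    · have hstep : pvCollectStep [] line = [] := by
        unfold pvCollectStep
        rw [if_neg (by simpa using hH)]
      have hA : pvAStep' (d, "") line = (d, "") := by
        unfold pvAStep'
        rw [if_neg (by intro h; exact absurd h.2 (by simpa using hH)), if_pos rfl]
      rw [hstep, hA]
      exact ih d

-- ===== VERDICT (by name: the statement is the Claim_ definition above) =====
theorem parse_mediainfo_py_spec : Claim_equal_parse_mediainfo_py := by
  intro output _
  unfold Spec_parse_mediainfo_py parse_mediainfo_py parse_mediainfo_py_alt
  have hfold : (PySem.Str.splitlines (if output == "" then "" else output)).foldl pvAStep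
        (PySem.Dict.empty, "")
      = (PySem.Str.splitlines (if output == "" then "" else output)).foldl pvAStep'
        (PySem.Dict.empty, "") :=
    PySem.List.foldl_congr_mem _ _ _ _
      (fun acc raw hraw => pvAStep_eq_noNl acc raw (mem_splitlines_no_nl _ raw hraw))
  simp only [hfold]
  rw [← pv_top]
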